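-- pv_equiv track=rewrite | github.com/brewmarsh/agent-readiness-scorecard | src/agent_scorecard/dependencies.py | calculate_context_tokens
-- ===== SOURCE A (Python) =====
-- from typing import List, Dict, Set, Tuple
--
-- def _get_transitive_dependencies(
--     start_node: str, graph: Dict[str, Set[str]]
-- ) -> Set[str]:
--     """
--     Calculates transitive dependencies using BFS.
--
--     Args:
--         start_node (str): The starting node.
--         graph (Dict[str, Set[str]]): The dependency graph.
--
--     Returns:
--         Set[str]: Set of all transitive dependencies (excluding start_node unless cyclic).
--     """
--     visited: Set[str] = set()
--     queue: List[str] = [start_node]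
--     visited.add(start_node)
--
--     idx = 0
--     while idx < len(queue):
--         current = queue[idx]
--         idx += 1
--
--         neighbors = graph.get(current, set())
--         for neighbor in neighbors:
--             if neighbor not in visited:
--                 visited.add(neighbor)
--                 queue.append(neighbor)
--
--     return visited
--
-- def calculate_context_tokens(
--     graph: Dict[str, Set[str]], file_tokens: Dict[str, int]
-- ) -> Dict[str, int]:
--     """
--     Calculates the cumulative token count for each file by summing the tokens of the file
--     and all its transitive dependencies.
--
--     Args:
--         graph (Dict[str, Set[str]]): The dependency graph (file -> set of dependencies).
--         file_tokens (Dict[str, int]): Map of file paths to their token counts.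
--
--     Returns:
--         Dict[str, int]: Map of file paths to their cumulative context token counts.
--     """
--     context_tokens: Dict[str, int] = {}
--
--     for file in graph:
--         visited = _get_transitive_dependencies(file, graph)
--         total_tokens = sum(file_tokens.get(f, 0) for f in visited)
--         context_tokens[file] = total_tokens
--
--     return context_tokens
-- ===== SOURCE B (Python) =====
-- def calculate_context_tokens(graph, file_tokens):
--     context_tokens = {}
--     for file in graph:
--         reach = {file}
--         while True:
--             frontier = {nb for node in reach for nb in graph.get(node, ()) if nb not in reach}
--             if not frontier:
--                 break
--             reach |= frontier
--         context_tokens[file] = sum(file_tokens.get(f, 0) for f in reach)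
--     return context_tokens
-- ===== Notes on version B (the rewrite author's own statement) =====
-- stated objective: alternative
-- what changed: A's per-node BFS with an explicit indexed worklist queue is replaced by whole-set frontier saturation: repeatedly expand the reachable set by the set of all new neighbors of the entire current set until a fixpoint, then sum tokens once.
import Mathlib
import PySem

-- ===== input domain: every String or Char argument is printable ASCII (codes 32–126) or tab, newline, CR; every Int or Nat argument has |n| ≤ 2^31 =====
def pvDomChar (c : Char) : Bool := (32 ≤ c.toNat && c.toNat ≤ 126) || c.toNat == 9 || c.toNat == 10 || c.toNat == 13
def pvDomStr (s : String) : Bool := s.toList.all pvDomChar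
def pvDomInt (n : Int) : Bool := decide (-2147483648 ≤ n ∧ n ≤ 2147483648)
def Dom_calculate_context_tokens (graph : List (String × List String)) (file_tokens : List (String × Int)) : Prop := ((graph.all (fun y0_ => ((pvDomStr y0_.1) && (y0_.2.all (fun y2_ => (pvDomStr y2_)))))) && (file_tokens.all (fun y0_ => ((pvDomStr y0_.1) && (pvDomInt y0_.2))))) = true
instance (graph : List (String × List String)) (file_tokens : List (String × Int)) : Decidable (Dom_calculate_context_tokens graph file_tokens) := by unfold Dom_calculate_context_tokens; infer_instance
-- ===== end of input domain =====

-- B replaces A's per-node BFS queue by whole-set frontier saturation to a fixpoint (alternative algorithm, similar cost); return values proved equal.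


-- ===== PORT A =====

-- graph.get(current, set()) : first-match association-list lookup with empty default
def pvNbrs (graph : List (String × List String)) (c : String) : List String :=
  PySem.Dict.getD (PySem.Dict.mk graph) c []

-- all node ids that can ever be appended to a queue/reach set (used only for termination measures)
def pvU (graph : List (String × List String)) : List String := graph.flatMap Prod.snd

-- the body of A's 'for neighbor in neighbors: if neighbor not in visited: visited.add; queue.append'
def pvAddNew (vq : List String × List String) (n : String) : List String × List String :=
  if n ∈ vq.1 then vq else (vq.1 ++ [n], vq.2 ++ [n])

lemma pvAddNew_foldl_spec (ns : List String) (v q : List String) :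
    ∃ s, ns.foldl pvAddNew (v, q) = (v ++ s, q ++ s) ∧ (∀ x ∈ s, x ∈ ns ∧ x ∉ v) ∧
      (∀ x ∈ ns, x ∈ v ++ s) ∧ s.Nodup := by
  induction ns generalizing v q with
  | nil => exact ⟨[], by simp⟩
  | cons n ns ih =>
    by_cases hn : n ∈ v
    · obtain ⟨s, h1, h2, h3, h4⟩ := ih v q
      refine ⟨s, ?_, ?_, ?_, h4⟩
      · simpa [List.foldl_cons, pvAddNew, hn] using h1
      · exact fun x hx => ⟨List.mem_cons_of_mem _ (h2 x hx).1, (h2 x hx).2⟩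
      · intro x hx
        rcases List.mem_cons.1 hx with rfl | hx
        · exact List.mem_append.2 (Or.inl hn)
        · exact h3 x hx
    · obtain ⟨s, h1, h2, h3, h4⟩ := ih (v ++ [n]) (q ++ [n])
      refine ⟨n :: s, ?_, ?_, ?_, ?_⟩
      · simpa [List.foldl_cons, pvAddNew, hn, List.append_assoc] using h1
      · intro x hx
        rcases List.mem_cons.1 hx with rfl | hx
        · exact ⟨List.mem_cons_self, hn⟩
        · refine ⟨List.mem_cons_of_mem _ (h2 x hx).1, fun hxv => (h2 x hx).2 ?_⟩
          simp [hxv]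
      · intro x hx
        rcases List.mem_cons.1 hx with rfl | hx
        · simp
        · have := h3 x hx
          simpa [List.append_assoc] using this
      · refine List.nodup_cons.2 ⟨fun hns => ?_, h4⟩
        have := (h2 n hns).2
        simp at this
  
lemma mem_pvU_of_mem_pvNbrs {g : List (String × List String)} {c x : String}
    (h : x ∈ pvNbrs g c) : x ∈ pvU g := by
  induction g with
  | nil => simp [pvNbrs, PySem.Dict.getD, PySem.Dict.get?] at h
  | cons p g ih =>
    unfold pvNbrs at h ih
    rw [PySem.Dict.getD_eq_get?_getD, PySem.Dict.get?_mk_cons] at h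
    by_cases hc : p.1 == c
    · simp [hc] at h
      exact List.mem_flatMap.2 ⟨p, List.mem_cons_self, h⟩
    · simp only [hc, Bool.false_eq_true, if_false] at h
      have hx : x ∈ pvU g := ih (by rw [PySem.Dict.getD_eq_get?_getD]; exact h)
      simp only [pvU, List.flatMap_cons]
      exact List.mem_append.2 (Or.inr (by simpa [pvU] using hx))

-- one new element strictly shrinks the unvisited part of the universe
lemma pvFilter_step {U v : List String} {x : String} (hxU : x ∈ U) (hxv : x ∉ v) :
    (U.filter (fun y => decide (y ∉ v ++ [x]))).length < (U.filter (fun y => decide (y ∉ v))).length := by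
  have h1 : U.filter (fun y => decide (y ∉ v ++ [x]))
      = (U.filter (fun y => decide (y ∉ v))).filter (fun y => decide (y ≠ x)) := by
    rw [List.filter_filter]
    refine List.filter_congr ?_
    intro a _
    by_cases h : a ∈ v <;> by_cases h' : a = x <;> simp [h, h']
  rw [h1]
  refine List.length_filter_lt_length_iff_exists.mpr ⟨x, ?_, by simp⟩
  simp [hxU, hxv]

-- adding k fresh universe elements shrinks it by at least k
lemma pvFilter_drop {U : List String} : ∀ (s v : List String), s.Nodup →
    (∀ x ∈ s, x ∈ U ∧ x ∉ v) →
    (U.filter (fun y => decide (y ∉ v ++ s))).length + s.length ≤ (U.filter (fun y => decide (y ∉ v))).length := by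
  intro s
  induction s with
  | nil => intro v _ _; simp
  | cons x s ih =>
    intro v hnd hs
    have hx := hs x List.mem_cons_self
    have hstep := pvFilter_step (v := v) hx.1 hx.2
    have hrec := ih (v ++ [x]) (List.nodup_cons.1 hnd).2 ?_
    · have hassoc : v ++ x :: s = (v ++ [x]) ++ s := by simp
      rw [hassoc]
      calc (U.filter (fun y => decide (y ∉ (v ++ [x]) ++ s))).length + (x :: s).length
          = ((U.filter (fun y => decide (y ∉ (v ++ [x]) ++ s))).length + s.length) + 1 := by
            simp [List.length_cons]; omega
        _ ≤ (U.filter (fun y => decide (y ∉ v ++ [x]))).length + 1 := by omega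
        _ ≤ (U.filter (fun y => decide (y ∉ v))).length := by omega
    · intro y hy
      refine ⟨(hs y (List.mem_cons_of_mem _ hy)).1, fun hyv => ?_⟩
      rcases List.mem_append.1 hyv with h | h
      · exact (hs y (List.mem_cons_of_mem _ hy)).2 h
      · simp at h
        subst h
        exact (List.nodup_cons.1 hnd).1 hy

-- A's BFS while-loop: visited set v, unprocessed queue suffix pending
def pvBfs (g : List (String × List String)) (v pending : List String) : List String :=
  match pending with
  | [] => v
  | c :: rest =>
    pvBfs g ((pvNbrs g c).foldl pvAddNew (v, [])).1
            (rest ++ ((pvNbrs g c).foldl pvAddNew (v, [])).2)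
termination_by ((pvU g).filter (fun y => decide (y ∉ v))).length + pending.length
decreasing_by
  obtain ⟨s, h1, h2, _, h4⟩ := pvAddNew_foldl_spec (pvNbrs g c) v []
  rw [h1]
  simp only [List.nil_append]
  have hs : ∀ x ∈ s, x ∈ pvU g ∧ x ∉ v :=
    fun x hx => ⟨mem_pvU_of_mem_pvNbrs (h2 x hx).1, (h2 x hx).2⟩
  have := pvFilter_drop (U := pvU g) s v h4 hs
  simp only [List.length_append, List.length_cons]
  omega

-- port of _get_transitive_dependencies: visited = {start}, queue = [start]
def pvGetTransitiveDeps (g : List (String × List String)) (start : String) : List String :=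
  pvBfs g [start] [start]

def calculate_context_tokens (graph : List (String × List String)) (file_tokens : List (String × Int)) : List (String × Int) :=
  (graph.foldl
    (fun d p =>
      PySem.Dict.insert d p.1
        ((pvGetTransitiveDeps graph p.1).foldl
          (fun acc f => acc + PySem.Dict.getD (PySem.Dict.mk file_tokens) f 0) 0))
    PySem.Dict.empty).items

-- ===== PORT B =====

-- the set comprehension {nb for node in reach for nb in graph.get(node, ()) if nb not in reach}
def pvFrontier (g : List (String × List String)) (reach : List String) : List String :=
  (reach.flatMap (fun node => pvNbrs g node)).foldl
    (fun acc nb => if nb ∈ reach ∨ nb ∈ acc then acc else acc ++ [nb]) []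

lemma pvFrontier_fold_spec (reach : List String) : ∀ (L acc : List String), acc.Nodup →
    (∀ a ∈ acc, a ∉ reach) →
    (L.foldl (fun acc nb => if nb ∈ reach ∨ nb ∈ acc then acc else acc ++ [nb]) acc).Nodup ∧
    (∀ x, x ∈ L.foldl (fun acc nb => if nb ∈ reach ∨ nb ∈ acc then acc else acc ++ [nb]) acc ↔
      x ∈ acc ∨ (x ∈ L ∧ x ∉ reach)) := by
  intro L
  induction L with
  | nil => intro acc h1 h2; simp [h1]
  | cons n L ih =>
    intro acc h1 h2
    by_cases hn : n ∈ reach ∨ n ∈ acc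
    · have := ih acc h1 h2
      rw [List.foldl_cons, if_pos hn]
      refine ⟨this.1, fun x => ?_⟩
      rw [this.2 x]
      constructor
      · rintro (h | h)
        · exact Or.inl h
        · exact Or.inr ⟨List.mem_cons_of_mem _ h.1, h.2⟩
      · rintro (h | ⟨hx, hxr⟩)
        · exact Or.inl h
        · rcases List.mem_cons.1 hx with rfl | hx
          · rcases hn with h' | h'
            · exact absurd h' hxr
            · exact Or.inl h'
          · exact Or.inr ⟨hx, hxr⟩
    · rw [not_or] at hn
      have hnd : (acc ++ [n]).Nodup := by
        simp [List.nodup_append, h1]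
        exact fun a ha h => hn.2 (h ▸ ha)
      have hmem : ∀ a ∈ acc ++ [n], a ∉ reach := by
        intro a ha
        rcases List.mem_append.1 ha with h | h
        · exact h2 a h
        · simp at h; subst h; exact hn.1
      have := ih (acc ++ [n]) hnd hmem
      rw [List.foldl_cons, if_neg (by simp [hn.1, hn.2])]
      refine ⟨this.1, fun x => ?_⟩
      rw [this.2 x]
      constructor
      · rintro (h | h)
        · rcases List.mem_append.1 h with h' | h'
          · exact Or.inl h'
          · simp at h'; subst h'
            exact Or.inr ⟨List.mem_cons_self, hn.1⟩
        · exact Or.inr ⟨List.mem_cons_of_mem _ h.1, h.2⟩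
      · rintro (h | ⟨hx, hxr⟩)
        · exact Or.inl (List.mem_append.2 (Or.inl h))
        · rcases List.mem_cons.1 hx with rfl | hx
          · exact Or.inl (by simp)
          · exact Or.inr ⟨hx, hxr⟩

lemma pvFrontier_spec (g : List (String × List String)) (reach : List String) :
    (pvFrontier g reach).Nodup ∧
    (∀ x, x ∈ pvFrontier g reach ↔ (x ∉ reach ∧ ∃ c ∈ reach, x ∈ pvNbrs g c)) := by
  obtain ⟨h1, h2⟩ := pvFrontier_fold_spec reach (reach.flatMap (fun node => pvNbrs g node)) [] (by simp) (by simp)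
  refine ⟨h1, fun x => ?_⟩
  rw [pvFrontier, h2 x]
  simp [List.mem_flatMap]
  tauto

-- B's saturation loop: grow reach by its whole frontier until the frontier is empty
def pvSaturate (g : List (String × List String)) (reach : List String) : List String :=
  if pvFrontier g reach = [] then reach
  else pvSaturate g (reach ++ pvFrontier g reach)
termination_by ((pvU g).filter (fun y => decide (y ∉ reach))).length
decreasing_by
  rename_i hne
  obtain ⟨hnd, hmem⟩ := pvFrontier_spec g reach
  have hs : ∀ x ∈ pvFrontier g reach, x ∈ pvU g ∧ x ∉ reach := by
    intro x hx
    obtain ⟨hxr, c, _, hcn⟩ := (hmem x).1 hx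
    exact ⟨mem_pvU_of_mem_pvNbrs hcn, hxr⟩
  have := pvFilter_drop (U := pvU g) (pvFrontier g reach) reach hnd hs
  have hlen : 0 < (pvFrontier g reach).length := List.length_pos_iff.2 hne
  omega

def calculate_context_tokens_alt (graph : List (String × List String)) (file_tokens : List (String × Int)) : List (String × Int) :=
  (graph.foldl
    (fun d p =>
      PySem.Dict.insert d p.1
        ((pvSaturate graph [p.1]).foldl
          (fun acc f => acc + PySem.Dict.getD (PySem.Dict.mk file_tokens) f 0) 0))
    PySem.Dict.empty).items

-- ===== PRECONDITION & SPEC =====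
def Spec_calculate_context_tokens (graph : List (String × List String)) (file_tokens : List (String × Int)) (out : List (String × Int)) : Prop := out = calculate_context_tokens_alt graph file_tokens
instance (graph : List (String × List String)) (file_tokens : List (String × Int)) (out : List (String × Int)) : Decidable (Spec_calculate_context_tokens graph file_tokens out) := by unfold Spec_calculate_context_tokens; infer_instance

-- ===== CLAIM (what is proved, stated in full; the proofs are below) =====
def Claim_equal_calculate_context_tokens : Prop := ∀ (graph : List (String × List String)) (file_tokens : List (String × Int)), Dom_calculate_context_tokens graph file_tokens → Spec_calculate_context_tokens graph file_tokens (calculate_context_tokens graph file_tokens)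

-- ===== LEMMAS AND PROOFS =====

-- reachability in the dependency graph
def pvEdge (g : List (String × List String)) (a b : String) : Prop := b ∈ pvNbrs g a
def pvReach (g : List (String × List String)) (s x : String) : Prop := Relation.ReflTransGen (pvEdge g) s x

theorem pvBfs_invariant (g : List (String × List String)) (start : String) :
    ∀ v pending, v.Nodup → (∀ x ∈ pending, x ∈ v) → (∀ x ∈ v, pvReach g start x) →
      (∀ c ∈ v, c ∉ pending → ∀ y ∈ pvNbrs g c, y ∈ v) → start ∈ v →
      (pvBfs g v pending).Nodup ∧ start ∈ pvBfs g v pending ∧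
      (∀ x ∈ pvBfs g v pending, pvReach g start x) ∧
      (∀ c ∈ pvBfs g v pending, ∀ y ∈ pvNbrs g c, y ∈ pvBfs g v pending) := by
  intro v pending
  fun_induction pvBfs g v pending with
  | case1 v =>
    intro h1 _ h3 h4 h5
    exact ⟨h1, h5, h3, fun c hc y hy => h4 c hc (by simp) y hy⟩
  | case2 v c rest ih =>
    intro h1 h2 h3 h4 h5
    obtain ⟨s, heq, hsmem, hns, hsnd⟩ := pvAddNew_foldl_spec (pvNbrs g c) v []
    rw [heq] at ih ⊢
    simp only [List.nil_append] at ih ⊢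
    have hc_v : c ∈ v := h2 c List.mem_cons_self
    apply ih
    · exact List.nodup_append.2 ⟨h1, hsnd, by intro a hav b hbs hab; exact (hsmem b hbs).2 (hab ▸ hav)⟩
    · intro x hx
      rcases List.mem_append.1 hx with hx | hx
      · exact List.mem_append.2 (Or.inl (h2 x (List.mem_cons_of_mem _ hx)))
      · exact List.mem_append.2 (Or.inr hx)
    · intro x hx
      rcases List.mem_append.1 hx with hx | hx
      · exact h3 x hx
      · exact Relation.ReflTransGen.tail (h3 c hc_v) (hsmem x hx).1
    · intro a ha hap
      by_cases hac : a = c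
      · subst hac
        intro y hy
        exact hns y hy
      · have hav : a ∈ v := by
          rcases List.mem_append.1 ha with h | h
          · exact h
          · exact absurd (List.mem_append.2 (Or.inr h)) hap
        have hanr : a ∉ rest := fun h => hap (List.mem_append.2 (Or.inl h))
        intro y hy
        have : y ∈ v := h4 a hav (by simp [hac, hanr]) y hy
        exact List.mem_append.2 (Or.inl this)
    · exact List.mem_append.2 (Or.inl h5)

theorem pvSaturate_invariant (g : List (String × List String)) (start : String) :
    ∀ reach, reach.Nodup → (∀ x ∈ reach, pvReach g start x) → start ∈ reach →
      (pvSaturate g reach).Nodup ∧ start ∈ pvSaturate g reach ∧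
      (∀ x ∈ pvSaturate g reach, pvReach g start x) ∧
      (∀ c ∈ pvSaturate g reach, ∀ y ∈ pvNbrs g c, y ∈ pvSaturate g reach) := by
  intro reach
  fun_induction pvSaturate g reach with
  | case1 reach hf =>
    intro h1 h2 h3
    refine ⟨h1, h3, h2, ?_⟩
    intro a ha y hy
    by_contra hyr
    have : y ∈ pvFrontier g reach := (pvFrontier_spec g reach).2 y |>.2 ⟨hyr, a, ha, hy⟩
    rw [hf] at this
    simp at this
  | case2 reach hf ih =>
    intro h1 h2 h3
    obtain ⟨hnd, hmem⟩ := pvFrontier_spec g reach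
    apply ih
    · exact List.nodup_append.2 ⟨h1, hnd, by intro a hav b hbf hab; exact (((hmem b).1 hbf).1) (hab ▸ hav)⟩
    · intro x hx
      rcases List.mem_append.1 hx with hx | hx
      · exact h2 x hx
      · obtain ⟨_, a, har, hay⟩ := (hmem x).1 hx
        exact Relation.ReflTransGen.tail (h2 a har) hay
    · exact List.mem_append.2 (Or.inl h3)

lemma pvReach_mem {g : List (String × List String)} {start : String} {w : List String}
    (hstart : start ∈ w) (hclosed : ∀ c ∈ w, ∀ y ∈ pvNbrs g c, y ∈ w) :
    ∀ x, pvReach g start x → x ∈ w := by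
  intro x h
  induction h with
  | refl => exact hstart
  | tail _ e ih => exact hclosed _ ih _ e

lemma pvInner_eq (g : List (String × List String)) (ft : List (String × Int)) (start : String) :
    (pvBfs g [start] [start]).foldl
      (fun acc f => acc + PySem.Dict.getD (PySem.Dict.mk ft) f 0) 0 =
    (pvSaturate g [start]).foldl
      (fun acc f => acc + PySem.Dict.getD (PySem.Dict.mk ft) f 0) 0 := by
  have hinit_nd : ([start] : List String).Nodup := by simp
  have hinit_snd : ∀ x ∈ ([start] : List String), pvReach g start x := by
    intro x hx; simp at hx; subst hx; exact Relation.ReflTransGen.refl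
  obtain ⟨hV1, hV2, hV3, hV4⟩ := pvBfs_invariant g start [start] [start] hinit_nd
    (fun x hx => hx) hinit_snd (fun c hc hcp => absurd hc hcp) (by simp)
  obtain ⟨hR1, hR2, hR3, hR4⟩ := pvSaturate_invariant g start [start] hinit_nd hinit_snd (by simp)
  have hiff : ∀ x, x ∈ pvBfs g [start] [start] ↔ x ∈ pvSaturate g [start] := by
    intro x
    exact ⟨fun h => pvReach_mem hR2 hR4 x (hV3 x h), fun h => pvReach_mem hV2 hV4 x (hR3 x h)⟩
  have hperm : (pvBfs g [start] [start]).Perm (pvSaturate g [start]) :=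
    (List.perm_ext_iff_of_nodup hV1 hR1).2 hiff
  rw [PySem.List.foldl_add, PySem.List.foldl_add]
  exact congrArg _ ((hperm.map _).sum_eq)

-- ===== VERDICT (by name: the statement is the Claim_ definition above) =====
theorem calculate_context_tokens_spec : Claim_equal_calculate_context_tokens := by
  intro graph file_tokens _
  unfold Spec_calculate_context_tokens calculate_context_tokens calculate_context_tokens_alt
  congr 1
  apply PySem.List.foldl_congr_mem
  intro acc p _
  rw [pvGetTransitiveDeps, pvInner_eq]
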